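-- pv_equiv track=rewrite | github.com/luizrennocosta/comp1ufrj | listas/lista1/submissions/listaavaliacao_1.py | questao3
-- ===== SOURCE A (Python) =====
-- def questao3 (string1, string2):
--     if 1<=len(string1)<=10000 and 1<=len(string2)<=10000:
--         alfabeto = ['a', 'b', 'c', 'd', 'e', 'f', 'g', 'h', 'i', 'j', 'k', 'l', 'm', 'n', 'o', 'p', 'q', 'r', 's', 't', 'u', 'v', 'x', 'y', 'z']
--         qtdletrasa = [0]*len(alfabeto)
--         qtdletrasb = [0]*len(alfabeto)
--         #a ideia é checar quantidade de cada letra por string e ver quais as diferenças.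
--         str1 =[]
--         str2 = []
--         for letra in string1:
--             str1 += [letra]
--         for letra in string2:
--             str2+= [letra]
--         contagem1 = 0
--         contagem2 = 0
--         while contagem1<len(str1):
--             while contagem2<len(alfabeto):
--                 if str1[contagem1]==alfabeto[contagem2]:
--                     qtdletrasa[contagem2]+=1
--                 contagem2+=1
--             contagem2=0
--             contagem1+=1
--         contagem1 = 0
--         contagem2 = 0
--         while contagem1<len(str2):
--             while contagem2<len(alfabeto):
--                 if str2[contagem1]==alfabeto[contagem2]:
--                     qtdletrasb[contagem2]+=1
--                 contagem2+=1
--             contagem2=0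
--             contagem1+=1
--         contagem=0
--         qtdletrasdif = 0 #quantidade de letras diferentes entre cada string, letras para serem retiradas
--         for quantidade in qtdletrasa:
--             if quantidade!= qtdletrasb[contagem]:
--                 if quantidade>qtdletrasb[contagem]:
--                     qtdletrasdif+= (quantidade) - (qtdletrasb[contagem])
--                 elif quantidade<qtdletrasb[contagem]:
--                     qtdletrasdif+= (qtdletrasb[contagem]) - (quantidade)
--             contagem+=1
--         return (qtdletrasdif)
-- ===== SOURCE B (Python) =====
-- def questao3(string1, string2):
--     if 1 <= len(string1) <= 10000 and 1 <= len(string2) <= 10000: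
--         alfabeto = set('abcdefghijklmnopqrstuvxyz')  # the 25 letters A uses (no 'w')
--         a = sorted(c for c in string1 if c in alfabeto)
--         b = sorted(c for c in string2 if c in alfabeto)
--         i = j = dif = 0
--         while i < len(a) and j < len(b):
--             if a[i] == b[j]:
--                 i += 1
--                 j += 1
--             elif a[i] < b[j]:
--                 dif += 1
--                 i += 1
--             else:
--                 dif += 1
--                 j += 1
--         return dif + (len(a) - i) + (len(b) - j)
-- ===== Notes on version B (the rewrite author's own statement) =====
-- stated objective: alternative
-- what changed: A fills two fixed 25-slot count arrays by scanning the whole alphabet for every character and then sums pairwise absolute differences; B never counts per letter: it sorts the filtered characters of each string and walks the two sorted lists with a two-pointer merge, adding 1 per unmatched character plus the leftover tails (the multiset symmetric-difference size, which equals the sum of absolute frequency differences).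
import Mathlib
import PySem

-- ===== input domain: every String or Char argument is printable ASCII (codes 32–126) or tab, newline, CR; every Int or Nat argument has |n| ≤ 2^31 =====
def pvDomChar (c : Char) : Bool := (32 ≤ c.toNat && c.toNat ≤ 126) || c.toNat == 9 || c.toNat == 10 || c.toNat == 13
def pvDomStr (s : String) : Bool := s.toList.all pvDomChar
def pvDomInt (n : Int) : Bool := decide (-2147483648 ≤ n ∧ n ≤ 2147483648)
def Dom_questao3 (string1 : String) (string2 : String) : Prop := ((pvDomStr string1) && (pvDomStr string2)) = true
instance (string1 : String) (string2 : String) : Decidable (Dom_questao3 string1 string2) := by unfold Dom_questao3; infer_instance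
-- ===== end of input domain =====

-- B replaces A's per-character 25-letter alphabet scan and count arrays by sort-then-merge: filter each string to the alphabet, sort, and count mismatches with a two-pointer walk (the multiset symmetric-difference size).


-- ===== PORT A =====
def pvAlfabeto : List Char :=
  ['a','b','c','d','e','f','g','h','i','j','k','l','m','n','o','p','q','r','s','t','u','v','x','y','z']

-- A's inner 'while contagem2 < len(alfabeto)' loop: walks alfabeto and the counts
-- list in lockstep (position = contagem2), bumping the slot where the letter matches.
def pvInner (letra : Char) : List Char → List Int → List Int
  | a :: as, q :: qs => (if letra == a then q + 1 else q) :: pvInner letra as qs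
  | _, qs => qs

def questao3 (string1 : String) (string2 : String) : Option Int :=
  if (1 ≤ PySem.Str.len string1 ∧ PySem.Str.len string1 ≤ 10000) ∧
     (1 ≤ PySem.Str.len string2 ∧ PySem.Str.len string2 ≤ 10000) then
    let alfabeto := pvAlfabeto
    let qtdletras0 : List Int := List.replicate alfabeto.length 0
    let str1 := string1.toList.foldl (fun acc letra => acc ++ [letra]) []
    let str2 := string2.toList.foldl (fun acc letra => acc ++ [letra]) []
    let qtdletrasa := str1.foldl (fun q letra => pvInner letra alfabeto q) qtdletras0
    let qtdletrasb := str2.foldl (fun q letra => pvInner letra alfabeto q) qtdletras0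
    let res := qtdletrasa.foldl (fun (st : Int × Nat) quantidade =>
      ((if quantidade ≠ qtdletrasb.getD st.2 0 then
          if quantidade > qtdletrasb.getD st.2 0 then st.1 + (quantidade - qtdletrasb.getD st.2 0)
          else if quantidade < qtdletrasb.getD st.2 0 then st.1 + (qtdletrasb.getD st.2 0 - quantidade)
          else st.1
        else st.1), st.2 + 1)) (0, 0)
    some res.1
  else
    none

-- ===== PORT B =====
def pvAlfaSet : PySem.Set Char := PySem.Set.ofList "abcdefghijklmnopqrstuvxyz".toList

-- B's 'while i < len(a) and j < len(b)' two-pointer loop plus the final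
-- 'dif + (len(a) - i) + (len(b) - j)': advancing an index = consuming a list head.
def pvMergeDif : List Char → List Char → Int → Int
  | [], b, dif => dif + b.length
  | x :: xs, [], dif => dif + (x :: xs).length
  | x :: xs, y :: ys, dif =>
    if x = y then pvMergeDif xs ys dif
    else if x < y then pvMergeDif xs (y :: ys) (dif + 1)
    else pvMergeDif (x :: xs) ys (dif + 1)
termination_by a b _ => a.length + b.length

def questao3_alt (string1 : String) (string2 : String) : Option Int :=
  if (1 ≤ PySem.Str.len string1 ∧ PySem.Str.len string1 ≤ 10000) ∧
     (1 ≤ PySem.Str.len string2 ∧ PySem.Str.len string2 ≤ 10000) then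
    let a := PySem.List.sorted (string1.toList.filter pvAlfaSet.contains) (fun x => x) false
    let b := PySem.List.sorted (string2.toList.filter pvAlfaSet.contains) (fun x => x) false
    some (pvMergeDif a b 0)
  else
    none

-- ===== PRECONDITION & SPEC =====
def Spec_questao3 (string1 : String) (string2 : String) (out : Option Int) : Prop := out = questao3_alt string1 string2
instance (string1 : String) (string2 : String) (out : Option Int) : Decidable (Spec_questao3 string1 string2 out) := by unfold Spec_questao3; infer_instance

-- ===== CLAIM (what is proved, stated in full; the proofs are below) =====
def Claim_equal_questao3 : Prop := ∀ (string1 : String) (string2 : String), Dom_questao3 string1 string2 → Spec_questao3 string1 string2 (questao3 string1 string2)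

-- ===== LEMMAS AND PROOFS =====

theorem pvInner_map (letra : Char) (g : Char → Int) :
    ∀ al : List Char, pvInner letra al (al.map g)
      = al.map (fun a => g a + if letra = a then 1 else 0) := by
  intro al
  induction al with
  | nil => simp [pvInner]
  | cons a as ih =>
    simp only [List.map_cons, pvInner, ih]
    by_cases h : letra = a <;> simp [h]

theorem pvFoldCounts (l : List Char) :
    ∀ g : Char → Int, l.foldl (fun q letra => pvInner letra pvAlfabeto q) (pvAlfabeto.map g)
      = pvAlfabeto.map (fun a => g a + (l.count a : Int)) := by
  induction l with
  | nil => intro g; simp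
  | cons c t ih =>
    intro g
    rw [List.foldl_cons, pvInner_map, ih]
    apply List.map_congr_left
    intro a _
    rw [List.count_cons]
    by_cases h : a = c
    · subst h; simp; ring
    · rw [if_neg (fun hh => h hh.symm), if_neg (fun hh => h (eq_of_beq hh).symm)]
      push_cast; ring

theorem pvIteAbs (d q b : Int) :
    (if q ≠ b then
        if q > b then d + (q - b)
        else if q < b then d + (b - q)
        else d
      else d) = d + |q - b| := by
  rcases lt_trichotomy q b with h | h | h
  · rw [if_pos (by omega), if_neg (by omega), if_pos h, abs_of_neg (by omega)]; ring
  · simp [h]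
  · rw [if_pos (by omega), if_pos h, abs_of_pos (by omega)]

theorem pvFoldDiff (qb : List Int) :
    ∀ (u w : List Int) (d : Int) (n : Nat), qb.drop n = w → u.length ≤ w.length →
      (u.foldl (fun (st : Int × Nat) quantidade =>
        ((if quantidade ≠ qb.getD st.2 0 then
            if quantidade > qb.getD st.2 0 then st.1 + (quantidade - qb.getD st.2 0)
            else if quantidade < qb.getD st.2 0 then st.1 + (qb.getD st.2 0 - quantidade)
            else st.1
          else st.1), st.2 + 1)) (d, n)).1
      = d + ((u.zip w).map (fun p => |p.1 - p.2|)).sum := by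
  intro u
  induction u with
  | nil => intro w d n _ _; simp
  | cons q u' ih =>
    intro w d n hdrop hlen
    cases w with
    | nil => simp at hlen
    | cons x w' =>
      have hx : qb.getD n 0 = x := by
        have : qb[n]? = some x := by
          have h0 : (qb.drop n)[0]? = some x := by rw [hdrop]; rfl
          rw [List.getElem?_drop] at h0; simpa using h0
        simp [List.getD, this]
      have hdrop' : qb.drop (n + 1) = w' := by
        rw [← List.drop_drop, hdrop]; rfl
      simp only [List.foldl_cons, hx]
      rw [pvIteAbs d q x, ih w' (d + |q - x|) (n + 1) hdrop' (by simpa using Nat.le_of_succ_le_succ (by simpa using hlen))]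
      simp [List.zip_cons_cons]
      ring

theorem pvAlfaSet_eq : (pvAlfaSet : List Char) = pvAlfabeto := by decide

theorem pvMemOfContains (k : Char) (h : PySem.Set.contains pvAlfaSet k = true) :
    k ∈ pvAlfabeto := by
  rw [← pvAlfaSet_eq]
  simpa [PySem.Set.contains] using h

theorem pvCons_sub_not_mem (x : Char) (s t : Multiset Char) (h : x ∉ t) :
    (x ::ₘ s) - t = x ::ₘ (s - t) := by
  ext c
  rw [Multiset.count_sub, Multiset.count_cons, Multiset.count_cons, Multiset.count_sub]
  by_cases hc : c = x
  · subst hc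
    rw [Multiset.count_eq_zero.2 h]
    simp
  · simp [hc]

theorem pvSub_cons_not_mem (x : Char) (s t : Multiset Char) (h : x ∉ t) :
    t - (x ::ₘ s) = t - s := by
  rw [Multiset.sub_cons, Multiset.erase_of_notMem h]

theorem pvMergeDif_eq (n : Nat) : ∀ (a b : List Char), a.length + b.length = n →
    a.Pairwise (· ≤ ·) → b.Pairwise (· ≤ ·) → ∀ dif : Int,
    pvMergeDif a b dif
      = dif + ((((a : Multiset Char) - (b : Multiset Char)).card
               + ((b : Multiset Char) - (a : Multiset Char)).card : ℕ) : ℤ) := by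
  induction n using Nat.strong_induction_on with
  | _ n ih =>
    intro a b hn ha hb dif
    cases a with
    | nil => simp [pvMergeDif]
    | cons x xs =>
     cases b with
     | nil => simp [pvMergeDif]
     | cons y ys =>
      have hxs : xs.Pairwise (· ≤ ·) := (List.pairwise_cons.1 ha).2
      have hys : ys.Pairwise (· ≤ ·) := (List.pairwise_cons.1 hb).2
      rw [pvMergeDif]
      by_cases hxy : x = y
      · subst hxy
        rw [if_pos rfl, ih (xs.length + ys.length) (by simp only [List.length_cons] at hn; omega) xs ys rfl hxs hys dif]
        have h1 : ((x :: xs : List Char) : Multiset Char) - ((x :: ys : List Char) : Multiset Char)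
            = (xs : Multiset Char) - (ys : Multiset Char) := by
          rw [← Multiset.cons_coe, ← Multiset.cons_coe, Multiset.sub_cons, Multiset.erase_cons_head]
        have h2 : ((x :: ys : List Char) : Multiset Char) - ((x :: xs : List Char) : Multiset Char)
            = (ys : Multiset Char) - (xs : Multiset Char) := by
          rw [← Multiset.cons_coe, ← Multiset.cons_coe, Multiset.sub_cons, Multiset.erase_cons_head]
        rw [h1, h2]
      · rw [if_neg hxy]
        by_cases hlt : x < y
        · rw [if_pos hlt]
          have hnm : x ∉ ((y :: ys : List Char) : Multiset Char) := by
            rw [Multiset.mem_coe]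
            intro hm
            have hyx : y ≤ x := by
              rcases List.mem_cons.1 hm with h' | h'
              · exact le_of_eq h'.symm
              · exact (List.pairwise_cons.1 hb).1 x h'
            exact absurd hlt (not_lt.2 hyx)
          rw [ih (xs.length + (y :: ys).length) (by simp only [List.length_cons] at hn ⊢; omega) xs (y :: ys) rfl hxs hb (dif + 1)]
          rw [show ((x :: xs : List Char) : Multiset Char) = x ::ₘ (xs : Multiset Char) from (Multiset.cons_coe x xs).symm,
            pvCons_sub_not_mem x _ _ hnm, pvSub_cons_not_mem x _ _ hnm, Multiset.card_cons]
          push_cast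
          ring
        · rw [if_neg hlt]
          have hyltx : y < x := lt_of_le_of_ne (not_lt.1 hlt) (fun h => hxy h.symm)
          have hnm : y ∉ ((x :: xs : List Char) : Multiset Char) := by
            rw [Multiset.mem_coe]
            intro hm
            have hxy' : x ≤ y := by
              rcases List.mem_cons.1 hm with h' | h'
              · exact le_of_eq h'.symm
              · exact (List.pairwise_cons.1 ha).1 y h'
            exact absurd hyltx (not_lt.2 hxy')
          rw [ih ((x :: xs).length + ys.length) (by simp only [List.length_cons] at hn ⊢; omega) (x :: xs) ys rfl ha hys (dif + 1)]
          rw [show ((y :: ys : List Char) : Multiset Char) = y ::ₘ (ys : Multiset Char) from (Multiset.cons_coe y ys).symm,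
            pvCons_sub_not_mem y _ _ hnm, pvSub_cons_not_mem y _ _ hnm, Multiset.card_cons]
          push_cast
          ring

theorem pvCardSub (u v : List Char) (hu : ∀ c ∈ u, c ∈ pvAlfabeto) :
    ((u : Multiset Char) - (v : Multiset Char)).card
      = ∑ a ∈ pvAlfabeto.toFinset, (u.count a - v.count a) := by
  rw [← Multiset.toFinset_sum_count_eq]
  have hsub : ((u : Multiset Char) - (v : Multiset Char)).toFinset ⊆ pvAlfabeto.toFinset := by
    intro a ha
    rw [Multiset.mem_toFinset] at ha
    have hpos := Multiset.count_pos.2 ha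
    rw [Multiset.count_sub] at hpos
    have hau : a ∈ (u : Multiset Char) := Multiset.count_pos.1 (by omega)
    rw [List.mem_toFinset]
    exact hu a (Multiset.mem_coe.1 hau)
  have hzero : ∀ x ∈ pvAlfabeto.toFinset, x ∉ ((u : Multiset Char) - (v : Multiset Char)).toFinset →
      Multiset.count x ((u : Multiset Char) - (v : Multiset Char)) = 0 := by
    intro x _ hx
    exact Multiset.count_eq_zero.2 (fun hm => hx (Multiset.mem_toFinset.2 hm))
  rw [Finset.sum_subset hsub hzero]
  exact Finset.sum_congr rfl (fun a _ => by
    rw [Multiset.count_sub, Multiset.coe_count, Multiset.coe_count])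

theorem pvNatAbs (m n : ℕ) : ((m - n : ℕ) : ℤ) + ((n - m : ℕ) : ℤ) = |(m : ℤ) - n| := by
  rcases le_total m n with h | h
  · rw [Nat.sub_eq_zero_of_le h, Int.natCast_sub h, abs_of_nonpos (by omega)]
    push_cast
    ring
  · rw [Nat.sub_eq_zero_of_le h, Int.natCast_sub h, abs_of_nonneg (by omega)]
    push_cast
    ring

theorem pvSymmDiff (u v : List Char) (hu : ∀ c ∈ u, c ∈ pvAlfabeto) (hv : ∀ c ∈ v, c ∈ pvAlfabeto) :
    ((((u : Multiset Char) - (v : Multiset Char)).card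
      + ((v : Multiset Char) - (u : Multiset Char)).card : ℕ) : ℤ)
      = (pvAlfabeto.map (fun a => |(u.count a : ℤ) - (v.count a : ℤ)|)).sum := by
  rw [Nat.cast_add, pvCardSub u v hu, pvCardSub v u hv, Nat.cast_sum, Nat.cast_sum,
    ← Finset.sum_add_distrib,
    ← List.sum_toFinset _ (by decide : pvAlfabeto.Nodup)]
  exact Finset.sum_congr rfl (fun a _ => pvNatAbs _ _)

set_option maxRecDepth 8192 in
theorem questao3_eq (string1 string2 : String) :
    questao3 string1 string2 = questao3_alt string1 string2 := by
  unfold questao3 questao3_alt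
  split_ifs with hg
  · simp only [PySem.List.foldl_append_singleton_eq_self, List.nil_append]
    have hrep : List.replicate pvAlfabeto.length (0:Int) = pvAlfabeto.map (fun _ => 0) := rfl
    rw [hrep, pvFoldCounts, pvFoldCounts]
    set l1 := string1.toList with hl1
    set l2 := string2.toList with hl2
    set f1 := List.filter pvAlfaSet.contains l1 with hf1
    set f2 := List.filter pvAlfaSet.contains l2 with hf2
    rw [pvFoldDiff (pvAlfabeto.map fun a => (0:Int) + (List.count a l2 : Int))
        (pvAlfabeto.map fun a => (0:Int) + (List.count a l1 : Int))
        (pvAlfabeto.map fun a => (0:Int) + (List.count a l2 : Int)) 0 0 rfl (by simp),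
      List.zip_map', List.map_map]
    -- B side: merge of the two sorted filtered lists = symmetric-difference size
    have hs1 : (PySem.List.sorted f1 (fun x => x) false).Pairwise (· ≤ ·) :=
      PySem.List.sorted_pairwise f1 (fun x => x)
    have hs2 : (PySem.List.sorted f2 (fun x => x) false).Pairwise (· ≤ ·) :=
      PySem.List.sorted_pairwise f2 (fun x => x)
    rw [pvMergeDif_eq ((PySem.List.sorted f1 (fun x => x) false).length
          + (PySem.List.sorted f2 (fun x => x) false).length)
        (PySem.List.sorted f1 (fun x => x) false) (PySem.List.sorted f2 (fun x => x) false)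
        rfl hs1 hs2 0]
    have hp1 : ((PySem.List.sorted f1 (fun x => x) false : List Char) : Multiset Char)
        = (f1 : Multiset Char) := Multiset.coe_eq_coe.2 (PySem.List.sorted_perm f1 (fun x => x) false)
    have hp2 : ((PySem.List.sorted f2 (fun x => x) false : List Char) : Multiset Char)
        = (f2 : Multiset Char) := Multiset.coe_eq_coe.2 (PySem.List.sorted_perm f2 (fun x => x) false)
    have hm1 : ∀ c ∈ f1, c ∈ pvAlfabeto := fun c hc =>
      pvMemOfContains c (List.of_mem_filter hc)
    have hm2 : ∀ c ∈ f2, c ∈ pvAlfabeto := fun c hc =>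
      pvMemOfContains c (List.of_mem_filter hc)
    rw [hp1, hp2, pvSymmDiff f1 f2 hm1 hm2, zero_add, zero_add]
    -- A side: turn counts over the raw strings into counts over the filtered lists
    have hpa : ∀ a ∈ pvAlfabeto, pvAlfaSet.contains a = true := fun a ha => by
      rw [pvAlfaSet_eq]; simpa [PySem.Set.contains] using ha
    rw [List.map_congr_left (fun a ha => by
      rw [Function.comp_apply, zero_add, zero_add,
        ← List.count_filter (p := pvAlfaSet.contains) (l := l1) (hpa a ha),
        ← List.count_filter (p := pvAlfaSet.contains) (l := l2) (hpa a ha), ← hf1, ← hf2] :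
      ∀ a ∈ pvAlfabeto,
        ((fun p : Int × Int => |p.1 - p.2|) ∘ fun a => ((0:Int) + (List.count a l1 : Int), (0:Int) + (List.count a l2 : Int))) a
          = |(List.count a f1 : Int) - (List.count a f2 : Int)|)]
  · rfl

-- ===== VERDICT (by name: the statement is the Claim_ definition above) =====
theorem questao3_spec : Claim_equal_questao3 := by
  intro string1 string2 _
  unfold Spec_questao3
  exact questao3_eq string1 string2
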